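-- pv_equiv track=rewrite | github.com/tjkpolisher/Baekjoon | 2025/20250217_25957.py | word_superiority_effect
-- ===== SOURCE A (Python) =====
-- def key_generator(word):
--     key = word
--
--     if len(word) > 2:
--         key = "-".join([word[0], word[-1], "".join(sorted(word[1:-1]))])
--     elif len(word) == 2:
--         key = "-".join(list(word))
--
--     return key
--
-- def word_matching_dict(word_list):
--     matching_dict = {}
--     for word in word_list:
--         key = key_generator(word)
--         matching_dict[key] = word
--     return matching_dict
--
-- def word_superiority_effect(word_list, S):
--     matching_dict = word_matching_dict(word_list)
--     word_S_list = S.split()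
--     answer = []
--     for word in word_S_list:
--         key = key_generator(word)
--         answer.append(matching_dict.get(key, word))
--     return " ".join(answer)
-- ===== SOURCE B (Python) =====
-- def key_generator(word):
--     key = word
--
--     if len(word) > 2:
--         key = "-".join([word[0], word[-1], "".join(sorted(word[1:-1]))])
--     elif len(word) == 2:
--         key = "-".join(list(word))
--
--     return key
--
-- def _find_match(word_list, word):
--     key = key_generator(word)
--     result = word
--     for cand in word_list:
--         if key_generator(cand) == key:
--             result = cand
--     return result
--
-- def word_superiority_effect(word_list, S):
--     return " ".join(_find_match(word_list, word) for word in S.split())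
-- ===== Notes on version B (the rewrite author's own statement) =====
-- stated objective: simpler
-- what changed: Drops the precomputed key->word dictionary entirely: for each word of S a single linear scan over word_list keeps the last word with an equal canonical key (falling back to the original word), instead of building and querying a matching dict.
import Mathlib
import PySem

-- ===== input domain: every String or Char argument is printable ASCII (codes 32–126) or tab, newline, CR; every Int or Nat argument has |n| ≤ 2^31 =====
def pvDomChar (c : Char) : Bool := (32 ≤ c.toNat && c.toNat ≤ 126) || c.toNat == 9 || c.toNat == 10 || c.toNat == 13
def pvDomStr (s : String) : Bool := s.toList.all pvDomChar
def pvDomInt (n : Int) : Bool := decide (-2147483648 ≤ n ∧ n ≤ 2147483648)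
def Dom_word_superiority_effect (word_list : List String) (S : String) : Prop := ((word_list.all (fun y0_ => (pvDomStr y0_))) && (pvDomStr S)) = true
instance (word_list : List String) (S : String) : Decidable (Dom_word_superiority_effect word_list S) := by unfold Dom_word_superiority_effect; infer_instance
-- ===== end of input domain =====

-- B replaces A's precomputed key->word dictionary by a direct linear scan per word of S
-- keeping the last key-equal word (same result, since dict insertion overwrites); objective: simpler.

-- ===== PORT A =====
-- shared helper: identical in Source A and Source B (B keeps key_generator unchanged).
-- Python sorts word[1:-1] as a list of 1-char strings; sorting the chars is exact
-- (1-char string comparison = char comparison), then "".join maps back via String.ofList.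
def key_generator (word : String) : String :=
  let cs := word.toList
  if cs.length > 2 then
    PySem.Str.join "-"
      [String.ofList [PySem.List.pyGetD cs 0 ' '],
       String.ofList [PySem.List.pyGetD cs (-1) ' '],
       PySem.Str.join "" ((PySem.List.sorted (PySem.List.slice cs (some 1) (some (-1))) (fun c => c) false).map (fun c => String.ofList [c]))]
  else if cs.length == 2 then
    PySem.Str.join "-" (cs.map (fun c => String.ofList [c]))
  else word

def word_matching_dict (word_list : List String) : PySem.Dict String String :=
  word_list.foldl (fun d w => d.insert (key_generator w) w) PySem.Dict.empty

def word_superiority_effect (word_list : List String) (S : String) : String :=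
  let matching_dict := word_matching_dict word_list
  let word_S_list := PySem.Str.split₀ S
  let answer := word_S_list.foldl (fun acc w => acc ++ [matching_dict.getD (key_generator w) w]) []
  PySem.Str.join " " answer

-- ===== PORT B =====
def find_match (word_list : List String) (word : String) : String :=
  let key := key_generator word
  word_list.foldl (fun res cand => if key_generator cand == key then cand else res) word

def word_superiority_effect_alt (word_list : List String) (S : String) : String :=
  PySem.Str.join " " ((PySem.Str.split₀ S).map (fun w => find_match word_list w))

-- ===== PRECONDITION & SPEC =====
def Spec_word_superiority_effect (word_list : List String) (S : String) (out : String) : Prop := out = word_superiority_effect_alt word_list S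
instance (word_list : List String) (S : String) (out : String) : Decidable (Spec_word_superiority_effect word_list S out) := by unfold Spec_word_superiority_effect; infer_instance

-- ===== CLAIM (what is proved, stated in full; the proofs are below) =====
def Claim_equal_word_superiority_effect : Prop := ∀ (word_list : List String) (S : String), Dom_word_superiority_effect word_list S → Spec_word_superiority_effect word_list S (word_superiority_effect word_list S)

-- ===== LEMMAS AND PROOFS =====

-- the dict built by overwriting inserts, looked up with default, equals the
-- last-match linear scan started from the default
theorem getD_foldl_insert_eq_scan (wl : List String) (d : PySem.Dict String String)
    (k w : String) :
    (wl.foldl (fun d w => d.insert (key_generator w) w) d).getD k w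
      = wl.foldl (fun res cand => if key_generator cand == k then cand else res) (d.getD k w) := by
  induction wl generalizing d with
  | nil => rfl
  | cons a t ih =>
      simp only [List.foldl_cons]
      rw [ih, PySem.Dict.getD_insert]
      by_cases h : k = key_generator a
      · simp [h]
      · simp [h, Ne.symm h]

theorem dict_lookup_eq_find_match (wl : List String) (w : String) :
    (word_matching_dict wl).getD (key_generator w) w = find_match wl w := by
  unfold word_matching_dict find_match
  rw [getD_foldl_insert_eq_scan, PySem.Dict.getD_empty]

-- ===== VERDICT (by name: the statement is the Claim_ definition above) =====
theorem word_superiority_effect_spec : Claim_equal_word_superiority_effect := by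
  intro word_list S _
  unfold Spec_word_superiority_effect word_superiority_effect word_superiority_effect_alt
  simp only [PySem.List.foldl_append_singleton_eq_map]
  congr 1
  exact List.map_congr_left fun w _ => dict_lookup_eq_find_match word_list w
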